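-- pv_equiv track=rewrite | github.com/cjfghk5697/LG-CNS | vers_by_sanghyeok/util_0804_13.py | reduce_dimension
-- ===== SOURCE A (Python) =====
-- def reduce_dimension(sorted_orders):
--     cur_w = 1
--
--     reduced_value = 0
--     for v in sorted_orders:
--         to_add = (v + 1) * cur_w
--         reduced_value += to_add
--
--         cur_w *= 500
--
--     return reduced_value
-- ===== SOURCE B (Python) =====
-- def reduce_dimension(sorted_orders):
--     reduced_value = 0
--     for v in reversed(sorted_orders):
--         reduced_value = reduced_value * 500 + (v + 1)
--     return reduced_value
-- ===== Notes on version B (the rewrite author's own statement) =====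
-- stated objective: simpler
-- what changed: Replaces the running base-500 weight multiplier with Horner's method over the reversed list (reduced_value = reduced_value*500 + (v+1)), dropping the separate cur_w state.
import Mathlib
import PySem

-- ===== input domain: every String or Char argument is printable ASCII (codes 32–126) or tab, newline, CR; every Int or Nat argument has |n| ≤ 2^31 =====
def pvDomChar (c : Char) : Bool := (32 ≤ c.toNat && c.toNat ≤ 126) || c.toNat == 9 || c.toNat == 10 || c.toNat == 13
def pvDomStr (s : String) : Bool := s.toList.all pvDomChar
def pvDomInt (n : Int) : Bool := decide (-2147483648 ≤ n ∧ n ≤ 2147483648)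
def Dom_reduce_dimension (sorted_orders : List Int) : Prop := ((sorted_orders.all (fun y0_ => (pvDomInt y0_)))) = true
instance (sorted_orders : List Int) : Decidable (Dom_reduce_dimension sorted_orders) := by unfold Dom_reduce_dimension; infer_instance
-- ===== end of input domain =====

-- B replaces A's running base-500 weight with Horner's method over the reversed list (simpler decomposition).

-- ===== PORT A =====
-- state (cur_w, reduced_value), one step per element, exactly as A's loop
def reduce_dimension (sorted_orders : List Int) : Int :=
  (sorted_orders.foldl
    (fun st v =>
      let to_add := (v + 1) * st.1
      (st.1 * 500, st.2 + to_add))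
    ((1 : Int), (0 : Int))).2

-- ===== PORT B =====
def reduce_dimension_alt (sorted_orders : List Int) : Int :=
  sorted_orders.reverse.foldl (fun reduced_value v => reduced_value * 500 + (v + 1)) 0

-- ===== PRECONDITION & SPEC =====
def Spec_reduce_dimension (sorted_orders : List Int) (out : Int) : Prop := out = reduce_dimension_alt sorted_orders
instance (sorted_orders : List Int) (out : Int) : Decidable (Spec_reduce_dimension sorted_orders out) := by unfold Spec_reduce_dimension; infer_instance

-- ===== CLAIM (what is proved, stated in full; the proofs are below) =====
def Claim_equal_reduce_dimension : Prop := ∀ (sorted_orders : List Int), Dom_reduce_dimension sorted_orders → Spec_reduce_dimension sorted_orders (reduce_dimension sorted_orders)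

-- ===== LEMMAS AND PROOFS =====

-- A's fold from an arbitrary state (w, r) equals r + w * (Horner value of the list)
theorem reduce_dimension_fold_eq (l : List Int) (w r : Int) :
    (l.foldl (fun st v =>
      let to_add := (v + 1) * st.1
      (st.1 * 500, st.2 + to_add)) (w, r)).2
    = r + w * l.foldr (fun v acc => acc * 500 + (v + 1)) 0 := by
  induction l generalizing w r with
  | nil => simp
  | cons x xs ih =>
    simp only [List.foldl_cons, List.foldr_cons]
    rw [ih]
    ring

-- ===== VERDICT (by name: the statement is the Claim_ definition above) =====
theorem reduce_dimension_spec : Claim_equal_reduce_dimension := by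
  intro l _
  unfold Spec_reduce_dimension reduce_dimension reduce_dimension_alt
  rw [reduce_dimension_fold_eq, List.foldl_reverse]
  simp
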